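-- pv_equiv track=rewrite | github.com/WallerTsai/OJ-Solution | leetcode-py/暴力/No3751.py | totalWaviness
-- ===== SOURCE A (Python) =====
-- from itertools import pairwise
--
-- def totalWaviness(num1: int, num2: int) -> int:
--     ans = 0
--     for num in range(max(num1, 100), num2 + 1):
--         s = str(num)
--         pre = s[0]
--         for a, b in pairwise(s):
--             if (a > pre and a > b) or (a < pre and a < b):
--                 ans += 1
--             pre = a
--     return ans
-- ===== SOURCE B (Python) =====
-- def totalWaviness(num1: int, num2: int) -> int:
--     lo = max(num1, 100)
--     if num2 < lo:
--         return 0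
--     pref = []
--     acc = 0
--     for t in range(1000):
--         a, b, c = t // 100, t // 10 % 10, t % 10
--         if (b > a and b > c) or (b < a and b < c):
--             acc += 1
--         pref.append(acc)
--
--     def G(N):  # sum of f(n % 1000) for n in [0, N]
--         q, r = divmod(N + 1, 1000)
--         return q * pref[999] + (pref[r - 1] if r > 0 else 0)
--
--     def wav(n):
--         res = 0
--         while n >= 100:
--             a, b, c = n // 100 % 10, n // 10 % 10, n % 10
--             if (b > a and b > c) or (b < a and b < c):
--                 res += 1
--             n //= 10
--         return res
--
--     def S(N):  # sum of wav(n) for n in [0, N]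
--         if N < 100:
--             return 0
--         return 10 * S(N // 10 - 1) + (N % 10 + 1) * wav(N // 10) + G(N) - G(99)
--
--     return S(num2) - S(lo - 1)
-- ===== Notes on version B (the rewrite author's own statement) =====
-- stated objective: faster
-- what changed: A scans the digit string of every number in [max(num1,100), num2]; B counts the same wavy positions in closed form via a digit-DP recursion S(N) = 10*S(N//10-1) + (N%10+1)*wav(N//10) + periodic-sum, using a precomputed 1000-entry prefix table of the three-digit peak/valley indicator, and returns S(num2) - S(lo-1).
import Mathlib
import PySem

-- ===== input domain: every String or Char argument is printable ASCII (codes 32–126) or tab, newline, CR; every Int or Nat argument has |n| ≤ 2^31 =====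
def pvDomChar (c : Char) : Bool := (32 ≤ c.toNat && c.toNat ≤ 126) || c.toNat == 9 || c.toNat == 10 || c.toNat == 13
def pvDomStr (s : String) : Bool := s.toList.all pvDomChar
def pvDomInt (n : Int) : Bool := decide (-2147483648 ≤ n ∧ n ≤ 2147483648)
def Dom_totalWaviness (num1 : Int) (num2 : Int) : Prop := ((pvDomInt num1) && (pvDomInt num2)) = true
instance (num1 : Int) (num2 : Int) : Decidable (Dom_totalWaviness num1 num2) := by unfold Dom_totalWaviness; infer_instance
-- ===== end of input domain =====

-- B replaces A's per-number string scan over the whole range by a digit-DP recursion with a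
-- 1000-entry prefix table (objective: faster, asymptotic — O(D^2) vs O(N·D)).

-- ===== PORT A =====
-- one step of A's inner `for a, b in pairwise(s)` loop; state = (ans, pre)
def pvInnerStep (st : Int × Char) (ab : Char × Char) : Int × Char :=
  (if (ab.1 > st.2 ∧ ab.1 > ab.2) ∨ (ab.1 < st.2 ∧ ab.1 < ab.2) then st.1 + 1 else st.1, ab.1)

-- A's per-number body: pre = s[0]; for a, b in pairwise(s): …  (s is str(num), never empty,
-- so the [] branch is unreachable; pairwise(s) = zip of s with its tail)
def pvInnerA (ans : Int) (cs : List Char) : Int :=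
  match cs with
  | [] => ans
  | c0 :: _ => ((List.zip cs cs.tail).foldl pvInnerStep (ans, c0)).1

def totalWaviness (num1 : Int) (num2 : Int) : Int :=
  (PySem.List.pyRange (max num1 100) (num2 + 1) 1).foldl
    (fun ans num => pvInnerA ans (PySem.Int.toChars num)) 0

-- ===== PORT B =====
-- the 1000-entry prefix-sum table of the peak/valley indicator f(t), t = 0..999
def pvPref : List Int :=
  ((PySem.List.pyRange 0 1000 1).foldl
    (fun (st : List Int × Int) t =>
      let a := PySem.Int.floordiv t 100
      let b := PySem.Int.mod (PySem.Int.floordiv t 10) 10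
      let c := PySem.Int.mod t 10
      let acc := if (b > a ∧ b > c) ∨ (b < a ∧ b < c) then st.2 + 1 else st.2
      (st.1 ++ [acc], acc)) ([], 0)).1

-- G(N) = sum of f(n % 1000) for n in [0, N]
def pvG (pref : List Int) (N : Int) : Int :=
  let q := PySem.Int.floordiv (N + 1) 1000
  let r := PySem.Int.mod (N + 1) 1000
  q * PySem.List.pyGetD pref 999 0 + (if r > 0 then PySem.List.pyGetD pref (r - 1) 0 else 0)

-- wav(n): B's arithmetic while-loop over the digit windows of n
def pvWav (n : Int) : Int :=
  if h : 100 ≤ n then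
    let a := PySem.Int.mod (PySem.Int.floordiv n 100) 10
    let b := PySem.Int.mod (PySem.Int.floordiv n 10) 10
    let c := PySem.Int.mod n 10
    (if (b > a ∧ b > c) ∨ (b < a ∧ b < c) then 1 else 0) + pvWav (PySem.Int.floordiv n 10)
  else 0
termination_by n.toNat
decreasing_by
  have : PySem.Int.floordiv n 10 = n / 10 := PySem.Int.floordiv_eq_ediv_of_pos (by omega)
  rw [this]; omega

-- S(N) = sum of wav(n) for n in [0, N]
def pvS (pref : List Int) (N : Int) : Int :=
  if N < 100 then 0
  else
    10 * pvS pref (PySem.Int.floordiv N 10 - 1)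
      + (PySem.Int.mod N 10 + 1) * pvWav (PySem.Int.floordiv N 10)
      + pvG pref N - pvG pref 99
termination_by N.toNat
decreasing_by
  have : PySem.Int.floordiv N 10 = N / 10 := PySem.Int.floordiv_eq_ediv_of_pos (by omega)
  rw [this]; omega

def totalWaviness_alt (num1 : Int) (num2 : Int) : Int :=
  let lo := max num1 100
  if num2 < lo then 0
  else
    let pref := pvPref
    pvS pref num2 - pvS pref (lo - 1)

-- ===== PRECONDITION & SPEC =====
def Spec_totalWaviness (num1 : Int) (num2 : Int) (out : Int) : Prop := out = totalWaviness_alt num1 num2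
instance (num1 : Int) (num2 : Int) (out : Int) : Decidable (Spec_totalWaviness num1 num2 out) := by unfold Spec_totalWaviness; infer_instance

-- ===== CLAIM (what is proved, stated in full; the proofs are below) =====
def Claim_equal_totalWaviness : Prop := ∀ (num1 : Int) (num2 : Int), Dom_totalWaviness num1 num2 → Spec_totalWaviness num1 num2 (totalWaviness num1 num2)

-- ===== LEMMAS AND PROOFS =====

-- the peak/valley indicator of a three-digit window, on Nat
def pvFN (t : Nat) : Int :=
  if (t / 100 < t / 10 % 10 ∧ t % 10 < t / 10 % 10) ∨ (t / 10 % 10 < t / 100 ∧ t / 10 % 10 < t % 10) then 1 else 0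

-- prefix sums of pvFN, and the true sums the fast program computes
def pvP (r : Nat) : Int := ((List.range (r + 1)).map pvFN).sum
def pvQ (k : Nat) : Int := ((List.range k).map pvFN).sum
def pvT (N : Nat) : Int := ((List.range (N + 1)).map (fun n => pvWav (n : Int))).sum
def pvGn (M : Nat) : Int :=
  ((M + 1) / 1000 : Nat) * pvP 999 + (if (M + 1) % 1000 > 0 then pvP ((M + 1) % 1000 - 1) else 0)
def pvW (M : Nat) : Int := ((List.range (M + 1)).map (fun n => pvFN (n % 1000))).sum
def pvU (N : Nat) : Int :=
  ((List.range (N + 1)).map (fun n => if 100 ≤ n then pvWav ((n / 10 : Nat) : Int) else 0)).sum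
def pvV (N : Nat) : Int :=
  ((List.range (N + 1)).map (fun n => if 100 ≤ n then pvFN (n % 1000) else 0)).sum

-- digit-char order agrees with digit order
lemma pv_dc_lt : ∀ a < 10, ∀ b < 10, (Nat.digitChar a < Nat.digitChar b ↔ a < b) := by decide

-- `Nat.toDigits` recursion (accumulator and fuel bookkeeping for `Nat.toDigitsCore`)
lemma pv_tdc_acc (f : Nat) : ∀ (n : Nat) (ds : List Char),
    Nat.toDigitsCore 10 f n ds = Nat.toDigitsCore 10 f n [] ++ ds := by
  induction f with
  | zero => intro n ds; simp [Nat.toDigitsCore]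
  | succ f ih =>
    intro n ds
    by_cases h : n / 10 = 0
    · simp [Nat.toDigitsCore, h]
    · simp only [Nat.toDigitsCore, h]
      rw [ih (n/10) (Nat.digitChar (n % 10) :: ds), ih (n/10) [Nat.digitChar (n % 10)]]
      simp

lemma pv_tdc_fuel : ∀ (n f₁ f₂ : Nat), n < f₁ → n < f₂ →
    Nat.toDigitsCore 10 f₁ n [] = Nat.toDigitsCore 10 f₂ n [] := by
  intro n
  induction n using Nat.strong_induction_on with
  | _ n ih =>
    intro f₁ f₂ h1 h2
    match f₁, f₂ with
    | g₁+1, g₂+1 =>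
      by_cases h : n / 10 = 0
      · simp [Nat.toDigitsCore, h]
      · simp only [Nat.toDigitsCore, h]
        rw [pv_tdc_acc g₁, pv_tdc_acc g₂]
        have hn10 : n / 10 < n := Nat.div_lt_self (by omega) (by omega)
        rw [ih (n/10) hn10 g₁ g₂ (by omega) (by omega)]

lemma pv_toDigits_small {m : Nat} (h : m < 10) : Nat.toDigits 10 m = [Nat.digitChar m] := by
  simp [Nat.toDigits, Nat.toDigitsCore, Nat.div_eq_of_lt h, Nat.mod_eq_of_lt h]

lemma pv_toDigits_rec {m : Nat} (h : 10 ≤ m) :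
    Nat.toDigits 10 m = Nat.toDigits 10 (m / 10) ++ [Nat.digitChar (m % 10)] := by
  have h10 : m / 10 ≠ 0 := by omega
  show Nat.toDigitsCore 10 (m+1) m [] = _
  simp only [Nat.toDigitsCore, h10]
  rw [pv_tdc_acc m]
  rw [pv_tdc_fuel (m/10) m (m/10+1) (Nat.div_lt_self (by omega) (by omega)) (by omega)]
  rfl

lemma pv_toDigits_ne_nil (m : Nat) : Nat.toDigits 10 m ≠ [] := by
  by_cases h : m < 10
  · simp [pv_toDigits_small h]
  · rw [pv_toDigits_rec (by omega)]; simp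

lemma pv_toDigits_getLastD (m : Nat) : (Nat.toDigits 10 m).getLastD 'x' = Nat.digitChar (m % 10) := by
  by_cases hm : m < 10
  · simp [pv_toDigits_small hm, Nat.mod_eq_of_lt hm]
  · simp [pv_toDigits_rec (show 10 ≤ m by omega)]

lemma pv_zip_snoc (ys : List Char) (y d : Char) :
    List.zip (y :: ys ++ [d]) (ys ++ [d]) =
      List.zip (y :: ys) ys ++ [((y :: ys).getLastD 'x', d)] := by
  induction ys generalizing y with
  | nil => simp
  | cons z zs ih =>
    have hz := ih z
    simp only [List.cons_append, List.zip_cons_cons] at hz ⊢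
    rw [hz]
    simp [List.getLastD]

-- one unfolding of pvWav
lemma pv_wav_small {n : Int} (h : n < 100) : pvWav n = 0 := by
  rw [pvWav]; simp [not_le.mpr h]

lemma pv_wav_step (n : Nat) (h : 100 ≤ n) :
    pvWav (n : Int) = pvWav ((n / 10 : Nat) : Int) + pvFN (n % 1000) := by
  have e1 : (n % 1000) / 100 = n / 100 % 10 := by omega
  have e2 : (n % 1000) / 10 % 10 = n / 10 % 10 := by omega
  have e3 : (n % 1000) % 10 = n % 10 := by omega
  rw [pvWav]
  rw [dif_pos (by exact_mod_cast h : (100:Int) ≤ (n:Int))]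
  have f100 : PySem.Int.floordiv (n:Int) 100 = ((n / 100 : Nat) : Int) := by
    exact_mod_cast PySem.Int.floordiv_natCast n 100
  have f10 : PySem.Int.floordiv (n:Int) 10 = ((n / 10 : Nat) : Int) := by
    exact_mod_cast PySem.Int.floordiv_natCast n 10
  have g1 : PySem.Int.mod ((n / 100 : Nat) : Int) 10 = ((n / 100 % 10 : Nat) : Int) := by
    exact_mod_cast PySem.Int.mod_natCast (n / 100) 10
  have g2 : PySem.Int.mod ((n / 10 : Nat) : Int) 10 = ((n / 10 % 10 : Nat) : Int) := by
    exact_mod_cast PySem.Int.mod_natCast (n / 10) 10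
  have g3 : PySem.Int.mod (n : Int) 10 = ((n % 10 : Nat) : Int) := by
    exact_mod_cast PySem.Int.mod_natCast n 10
  simp only [f100, f10, g1, g2, g3, gt_iff_lt, Nat.cast_lt, pvFN, e1, e2, e3]
  ring

-- A's inner pairwise fold on the digit string of m computes pvWav m (state: ans and pre)
lemma pv_inner_fold (m : Nat) : ∀ ans : Int,
    (List.zip (Nat.toDigits 10 m) (Nat.toDigits 10 m).tail).foldl pvInnerStep
        (ans, (Nat.toDigits 10 m).headD 'x')
      = (ans + pvWav (m : Int), Nat.digitChar (if m < 10 then m else m / 10 % 10)) := by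
  induction m using Nat.strong_induction_on with
  | _ m ih =>
  intro ans
  by_cases hm : m < 10
  · rw [pv_toDigits_small hm]
    simp [hm, pv_wav_small (show (m:Int) < 100 by exact_mod_cast lt_trans hm (by norm_num))]
  · have hm10 : 10 ≤ m := not_lt.mp hm
    have hql : m / 10 < m := Nat.div_lt_self (by omega) (by omega)
    obtain ⟨y, ts, hys⟩ : ∃ y ts, Nat.toDigits 10 (m / 10) = y :: ts := by
      cases hys : Nat.toDigits 10 (m / 10) with
      | nil => exact absurd hys (pv_toDigits_ne_nil _)
      | cons a b => exact ⟨a, b, rfl⟩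
    have hlast : (y :: ts).getLastD 'x' = Nat.digitChar (m / 10 % 10) := by
      rw [← hys, pv_toDigits_getLastD]
    rw [pv_toDigits_rec hm10, hys]
    simp only [List.cons_append, List.tail_cons, List.headD_cons]
    rw [show (y :: (ts ++ [Nat.digitChar (m % 10)])) = y :: ts ++ [Nat.digitChar (m % 10)] from rfl,
        pv_zip_snoc ts y (Nat.digitChar (m % 10))]
    rw [List.foldl_append]
    have ihq := ih (m / 10) hql ans
    rw [hys] at ihq
    simp only [List.tail_cons, List.headD_cons] at ihq
    rw [ihq, hlast]
    simp only [List.foldl_cons, List.foldl_nil, pvInnerStep]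
    by_cases hq : m / 10 < 10
    · have hqq : m / 10 % 10 = m / 10 := Nat.mod_eq_of_lt hq
      rw [if_pos hq, hqq]
      have : ¬ ((Nat.digitChar (m / 10) > Nat.digitChar (m / 10) ∧ Nat.digitChar (m / 10) > Nat.digitChar (m % 10)) ∨
          (Nat.digitChar (m / 10) < Nat.digitChar (m / 10) ∧ Nat.digitChar (m / 10) < Nat.digitChar (m % 10))) := by
        simp
      rw [if_neg this]
      have hm100 : m < 100 := by omega
      rw [pv_wav_small (show ((m:Int)) < 100 by exact_mod_cast hm100),
          pv_wav_small (show ((m/10 : Nat):Int) < 100 by exact_mod_cast lt_trans hq (by norm_num))]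
      simp [hm]
    · have hm100 : 100 ≤ m := by omega
      rw [if_neg hq]
      have b1 : m / 10 % 10 < 10 := Nat.mod_lt _ (by omega)
      have b2 : m / 10 / 10 % 10 < 10 := Nat.mod_lt _ (by omega)
      have b3 : m % 10 < 10 := Nat.mod_lt _ (by omega)
      have c1 := pv_dc_lt _ b2 _ b1
      have c2 := pv_dc_lt _ b3 _ b1
      have c3 := pv_dc_lt _ b1 _ b2
      have c4 := pv_dc_lt _ b1 _ b3
      have hdd : m / 10 / 10 % 10 = (m % 1000) / 100 := by omega
      have hb : m / 10 % 10 = (m % 1000) / 10 % 10 := by omega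
      have hc : m % 10 = (m % 1000) % 10 := by omega
      rw [pv_wav_step m hm100]
      simp only [gt_iff_lt, c1, c2, c3, c4, pvFN, ← hdd, ← hb, ← hc, hm, if_false]
      split_ifs with hcond
      · simp [add_assoc]
      · simp

lemma pv_innerA_eq (m : Nat) (ans : Int) :
    pvInnerA ans (PySem.Int.toChars (m : Int)) = ans + pvWav (m : Int) := by
  have : PySem.Int.toChars (m : Int) = Nat.toDigits 10 m := by
    simp [PySem.Int.toChars]
  rw [this]
  obtain ⟨y, ts, hys⟩ : ∃ y ts, Nat.toDigits 10 m = y :: ts := by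
    cases hys : Nat.toDigits 10 m with
    | nil => exact absurd hys (pv_toDigits_ne_nil _)
    | cons a b => exact ⟨a, b, rfl⟩
  have hif := pv_inner_fold m ans
  rw [hys] at hif ⊢
  simp only [List.headD_cons, List.tail_cons] at hif
  simp only [pvInnerA, List.tail_cons, hif]

-- step and smallness lemmas for the sums
lemma pv_T_succ (N : Nat) : pvT (N + 1) = pvT N + pvWav ((N + 1 : Nat) : Int) := by
  simp [pvT, List.range_succ, add_assoc]
lemma pv_P_succ (r : Nat) : pvP (r + 1) = pvP r + pvFN (r + 1) := by
  simp [pvP, List.range_succ, add_assoc]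
lemma pv_W_succ (M : Nat) : pvW (M + 1) = pvW M + pvFN ((M + 1) % 1000) := by
  simp [pvW, List.range_succ, add_assoc]
lemma pv_U_succ (N : Nat) :
    pvU (N + 1) = pvU N + (if 100 ≤ N + 1 then pvWav (((N + 1) / 10 : Nat) : Int) else 0) := by
  simp [pvU, List.range_succ, add_assoc]
lemma pv_V_succ (N : Nat) :
    pvV (N + 1) = pvV N + (if 100 ≤ N + 1 then pvFN ((N + 1) % 1000) else 0) := by
  simp [pvV, List.range_succ, add_assoc]

lemma pv_T_small {N : Nat} (h : N < 100) : pvT N = 0 := by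
  induction N with
  | zero => simp [pvT, pv_wav_small (show (0:Int) < 100 by norm_num)]
  | succ N ih =>
    have hN : ((N + 1 : Nat) : Int) < 100 := by exact_mod_cast h
    rw [pv_T_succ, ih (by omega), pv_wav_small hN]; ring

lemma pv_U_small {N : Nat} (h : N < 100) : pvU N = 0 := by
  induction N with
  | zero => simp [pvU]
  | succ N ih => rw [pv_U_succ, ih (by omega), if_neg (by omega)]; ring

lemma pv_V_small {N : Nat} (h : N < 100) : pvV N = 0 := by
  induction N with
  | zero => simp [pvV]
  | succ N ih => rw [pv_V_succ, ih (by omega), if_neg (by omega)]; ring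

-- the prefix table built by B's loop is the map of pvP
lemma pv_pref_build : ∀ k : Nat,
    ((List.range k).map (Nat.cast : Nat → Int)).foldl
      (fun (st : List Int × Int) t =>
        let a := PySem.Int.floordiv t 100
        let b := PySem.Int.mod (PySem.Int.floordiv t 10) 10
        let c := PySem.Int.mod t 10
        let acc := if (b > a ∧ b > c) ∨ (b < a ∧ b < c) then st.2 + 1 else st.2
        (st.1 ++ [acc], acc)) ([], 0)
    = ((List.range k).map pvP, pvQ k) := by
  intro k
  induction k with
  | zero => simp [pvQ]
  | succ k ih =>
    rw [List.range_succ, List.map_append, List.foldl_append, ih]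
    have f100 : PySem.Int.floordiv (k : Int) 100 = ((k / 100 : Nat) : Int) := by
      exact_mod_cast PySem.Int.floordiv_natCast k 100
    have f10 : PySem.Int.floordiv (k : Int) 10 = ((k / 10 : Nat) : Int) := by
      exact_mod_cast PySem.Int.floordiv_natCast k 10
    have g2 : PySem.Int.mod ((k / 10 : Nat) : Int) 10 = ((k / 10 % 10 : Nat) : Int) := by
      exact_mod_cast PySem.Int.mod_natCast (k / 10) 10
    have g3 : PySem.Int.mod (k : Int) 10 = ((k % 10 : Nat) : Int) := by
      exact_mod_cast PySem.Int.mod_natCast k 10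
    simp only [List.map_cons, List.map_nil, List.foldl_cons, List.foldl_nil,
      f100, f10, g2, g3, gt_iff_lt, Nat.cast_lt]
    have hacc : (if (k / 100 < k / 10 % 10 ∧ k % 10 < k / 10 % 10) ∨
        (k / 10 % 10 < k / 100 ∧ k / 10 % 10 < k % 10) then pvQ k + 1 else pvQ k)
        = pvQ k + pvFN k := by
      rw [pvFN]; split_ifs <;> simp
    rw [hacc]
    have h1 : pvP k = pvQ k + pvFN k := by
      rw [pvP, pvQ, List.range_succ, List.map_append]; simp
    have h2 : pvQ (k + 1) = pvQ k + pvFN k := by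
      rw [pvQ, pvQ, List.range_succ, List.map_append]; simp
    simp [List.map_append, h1, h2]

lemma pv_pref_eq : pvPref = (List.range 1000).map pvP := by
  have h1000 : PySem.List.pyRange 0 1000 1 = (List.range 1000).map (Nat.cast : Nat → Int) := by
    rw [PySem.List.pyRange_one]
    norm_num
    apply List.map_congr_left
    intro a _; simp
  rw [pvPref, h1000, pv_pref_build 1000]

lemma pv_pref_getD (j : Nat) (hj : j < 1000) :
    PySem.List.pyGetD pvPref (j : Int) 0 = pvP j := by
  rw [pv_pref_eq, PySem.List.pyGetD_natCast]
  rw [List.getD_eq_getElem?_getD]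
  simp [List.getElem?_map, List.getElem?_range hj]

lemma pv_G_eq (M : Nat) : pvG pvPref (M : Int) = pvGn M := by
  have hM1 : ((M : Int) + 1) = ((M + 1 : Nat) : Int) := by push_cast; ring
  have fq : PySem.Int.floordiv ((M + 1 : Nat) : Int) 1000 = (((M + 1) / 1000 : Nat) : Int) := by
    exact_mod_cast PySem.Int.floordiv_natCast (M + 1) 1000
  have fr : PySem.Int.mod ((M + 1 : Nat) : Int) 1000 = (((M + 1) % 1000 : Nat) : Int) := by
    exact_mod_cast PySem.Int.mod_natCast (M + 1) 1000
  rw [pvG, hM1, fq, fr]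
  have h999 : PySem.List.pyGetD pvPref 999 0 = pvP 999 := by
    have := pv_pref_getD 999 (by norm_num)
    norm_num at this ⊢
    exact this
  rw [h999]
  by_cases hr : (M + 1) % 1000 > 0
  · rw [if_pos (by exact_mod_cast hr), pvGn, if_pos hr]
    have : (((M + 1) % 1000 : Nat) : Int) - 1 = (((M + 1) % 1000 - 1 : Nat) : Int) := by
      push_cast [Nat.cast_sub (show 1 ≤ (M+1) % 1000 by omega)]; ring
    rw [this, pv_pref_getD _ (by omega)]
  · rw [if_neg (by exact_mod_cast hr), pvGn, if_neg hr]

lemma pv_Gn_eq_W (M : Nat) : pvGn M = pvW M := by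
  induction M with
  | zero =>
    rw [pvGn, pvW]
    norm_num [pvP]
  | succ M ih =>
    rw [pv_W_succ, ← ih]
    set q := (M + 1) / 1000 with hq
    set r := (M + 1) % 1000 with hr
    have hrq : M + 1 = 1000 * q + r := by omega
    by_cases h999 : r = 999
    · have e1 : (M + 2) / 1000 = q + 1 := by omega
      have e2 : (M + 2) % 1000 = 0 := by omega
      rw [pvGn, pvGn, show M + 1 + 1 = M + 2 from rfl, e1, e2, ← hq, ← hr, h999]
      rw [if_neg (by omega), if_pos (by omega)]
      have : pvP 999 = pvP 998 + pvFN 999 := pv_P_succ 998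
      push_cast
      rw [this]; ring
    · have e1 : (M + 2) / 1000 = q := by omega
      have e2 : (M + 2) % 1000 = r + 1 := by omega
      rw [pvGn, pvGn, show M + 1 + 1 = M + 2 from rfl, e1, e2, ← hq, ← hr]
      rw [if_pos (by omega)]
      by_cases hr0 : r = 0
      · rw [hr0]
        rw [if_neg (by omega)]
        simp [pvP]
      · rw [if_pos (by omega)]
        obtain ⟨s, hs⟩ : ∃ s, r = s + 1 := ⟨r - 1, by omega⟩
        have h2 : pvP r = pvP (r - 1) + pvFN r := by
          rw [hs]; simpa using pv_P_succ s
        rw [show r + 1 - 1 = r by omega, h2]; ring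

lemma pv_T_split (N : Nat) : pvT N = pvU N + pvV N := by
  induction N with
  | zero =>
    rw [pvT, pvU, pvV]
    simp [pv_wav_small (show (0:Int) < 100 by norm_num)]
  | succ N ih =>
    rw [pv_T_succ, pv_U_succ, pv_V_succ, ih]
    by_cases h : 100 ≤ N + 1
    · rw [if_pos h, if_pos h, pv_wav_step (N + 1) h]; ring
    · rw [if_neg h, if_neg h, pv_wav_small (show ((N+1 : Nat):Int) < 100 by exact_mod_cast by omega)]
      ring

lemma pv_U_eq (N : Nat) (h : 100 ≤ N) :
    pvU N = 10 * pvT (N / 10 - 1) + ((N % 10 : Nat) + 1) * pvWav ((N / 10 : Nat) : Int) := by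
  induction N, h using Nat.le_induction with
  | base =>
    rw [show (100 : Nat) = 99 + 1 from rfl, pv_U_succ, pv_U_small (by omega)]
    have w10 : pvWav ((10 : Nat) : Int) = 0 := pv_wav_small (by norm_num)
    have t9 : pvT 9 = 0 := pv_T_small (by omega)
    norm_num [w10, t9]
  | succ N hN ih =>
    rw [pv_U_succ, if_pos (by omega), ih]
    by_cases h9 : N % 10 = 9
    · have d1 : (N + 1) / 10 = N / 10 + 1 := by omega
      have d2 : (N + 1) % 10 = 0 := by omega
      have d3 : N / 10 - 1 + 1 = N / 10 := by omega
      rw [d1, d2, h9]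
      have hT : pvT (N / 10 + 1 - 1) = pvT (N / 10 - 1) + pvWav ((N / 10 : Nat) : Int) := by
        rw [show N / 10 + 1 - 1 = N / 10 - 1 + 1 by omega, pv_T_succ, d3]
      rw [hT]
      push_cast
      ring
    · have d1 : (N + 1) / 10 = N / 10 := by omega
      have d2 : (N + 1) % 10 = N % 10 + 1 := by omega
      rw [d1, d2]
      push_cast
      ring

lemma pv_V_eq (N : Nat) (h : 100 ≤ N) : pvV N = pvGn N - pvGn 99 := by
  rw [pv_Gn_eq_W, pv_Gn_eq_W]
  induction N, h using Nat.le_induction with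
  | base =>
    rw [show (100 : Nat) = 99 + 1 from rfl, pv_V_succ, pv_V_small (by omega), pv_W_succ]
    norm_num
  | succ N hN ih =>
    rw [pv_V_succ, if_pos (by omega), pv_W_succ, ih]
    ring

-- the fast recursion computes the true running sum
lemma pv_S_eq (N : Nat) : pvS pvPref (N : Int) = pvT N := by
  induction N using Nat.strong_induction_on with
  | _ N ih =>
  by_cases h : N < 100
  · rw [pvS, if_pos (by exact_mod_cast h), pv_T_small h]
  · have h100 : 100 ≤ N := by omega
    rw [pvS, if_neg (by exact_mod_cast h)]
    have f10 : PySem.Int.floordiv (N : Int) 10 = ((N / 10 : Nat) : Int) := by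
      exact_mod_cast PySem.Int.floordiv_natCast N 10
    have g10 : PySem.Int.mod (N : Int) 10 = ((N % 10 : Nat) : Int) := by
      exact_mod_cast PySem.Int.mod_natCast N 10
    have hsub : ((N / 10 : Nat) : Int) - 1 = ((N / 10 - 1 : Nat) : Int) := by
      push_cast [Nat.cast_sub (show 1 ≤ N / 10 by omega)]; ring
    have h99 : pvG pvPref 99 = pvGn 99 := by
      have := pv_G_eq 99; norm_num at this ⊢; exact this
    rw [f10, g10, hsub, pv_G_eq N, h99, ih (N / 10 - 1) (by omega)]
    rw [pv_T_split N, pv_U_eq N h100, pv_V_eq N h100]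
    ring

-- A's outer fold over the range is a difference of running sums
lemma pv_A_sum (l : Nat) (hl : 100 ≤ l) : ∀ (h : Nat), l - 1 ≤ h →
    (PySem.List.pyRange (l : Int) ((h : Int) + 1) 1).foldl
        (fun ans num => pvInnerA ans (PySem.Int.toChars num)) 0
      = pvT h - pvT (l - 1) := by
  intro h hh
  induction h, hh using Nat.le_induction with
  | base =>
    rw [PySem.List.pyRange_one]
    have : (((l - 1 : Nat) : Int) + 1 - (l : Int)).toNat = 0 := by
      have : ((l - 1 : Nat) : Int) = (l : Int) - 1 := by
        push_cast [Nat.cast_sub (show 1 ≤ l by omega)]; ring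
      omega
    rw [this]
    simp
  | succ h hh ih =>
    have hstep : PySem.List.pyRange (l : Int) (((h + 1 : Nat) : Int) + 1) 1
        = PySem.List.pyRange (l : Int) ((h : Int) + 1) 1 ++ [((h + 1 : Nat) : Int)] := by
      rw [PySem.List.pyRange_one, PySem.List.pyRange_one]
      have e1 : (((h + 1 : Nat) : Int) + 1 - (l : Int)).toNat = (h + 1 - l) + 1 := by
        omega
      have e2 : (((h : Nat) : Int) + 1 - (l : Int)).toNat = h + 1 - l := by
        omega
      rw [e1, e2, List.range_succ, List.map_append]
      congr 1
      simp only [List.map_cons, List.map_nil]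
      congr 1
      push_cast; omega
    rw [hstep, List.foldl_append, ih]
    simp only [List.foldl_cons, List.foldl_nil]
    rw [pv_innerA_eq (h + 1), pv_T_succ]
    ring

-- ===== VERDICT (by name: the statement is the Claim_ definition above) =====
theorem totalWaviness_spec : Claim_equal_totalWaviness := by
  intro num1 num2 _dom
  unfold Spec_totalWaviness totalWaviness totalWaviness_alt
  have hlo : (100 : Int) ≤ max num1 100 := le_max_right _ _
  by_cases hcmp : num2 < max num1 100
  · rw [if_pos hcmp]
    rw [PySem.List.pyRange_one]
    have : (num2 + 1 - max num1 100).toNat = 0 := by omega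
    rw [this]
    simp
  · rw [if_neg hcmp]
    have h2 : max num1 100 ≤ num2 := not_lt.mp hcmp
    have hl0 : (0 : Int) ≤ max num1 100 := by omega
    have hh0 : (0 : Int) ≤ num2 := by omega
    obtain ⟨l, hl⟩ : ∃ l : Nat, max num1 100 = (l : Int) :=
      ⟨(max num1 100).toNat, (Int.toNat_of_nonneg hl0).symm⟩
    obtain ⟨h, hh⟩ : ∃ h : Nat, num2 = (h : Int) := ⟨num2.toNat, (Int.toNat_of_nonneg hh0).symm⟩
    have hl100 : 100 ≤ l := by rw [hl] at hlo; exact_mod_cast hlo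
    have hlh : l - 1 ≤ h := by
      rw [hl, hh] at h2
      have : l ≤ h := by exact_mod_cast h2
      omega
    have hsub : (l : Int) - 1 = ((l - 1 : Nat) : Int) := by
      push_cast [Nat.cast_sub (show 1 ≤ l by omega)]; ring
    show _ = pvS pvPref num2 - pvS pvPref (max num1 100 - 1)
    rw [hl, hh, pv_A_sum l hl100 h hlh, hsub, pv_S_eq, pv_S_eq]
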